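-- pv_equiv track=rewrite | github.com/aphearin/umachine_pyio | umachine_pyio/process_ascii_into_memmap.py | _data_array_indices_from_dict
-- ===== SOURCE A (Python) =====
-- from collections import OrderedDict
--
-- def _data_array_indices_from_dict(columns_dict, requested_colnames):
--     data_array_indices = OrderedDict()
--     icur = 0
--     for colname in requested_colnames:
--         colname_dt, colname_ifirst, colname_ilast = columns_dict[colname]
--         data_array_indices[colname] = (icur, icur + (colname_ilast - colname_ifirst))
--         icur += (colname_ilast - colname_ifirst) + 1
--     return data_array_indices
-- ===== SOURCE B (Python) =====
-- from collections import OrderedDict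
-- from itertools import accumulate
--
--
-- def _data_array_indices_from_dict(columns_dict, requested_colnames):
--     widths = [columns_dict[c][2] - columns_dict[c][1] for c in requested_colnames]
--     starts = accumulate((w + 1 for w in widths), initial=0)
--     return OrderedDict(
--         (c, (s, s + w)) for c, s, w in zip(requested_colnames, starts, widths))
-- ===== Notes on version B (the rewrite author's own statement) =====
-- stated objective: alternative
-- what changed: Replaces the single fused dict-building loop with a three-stage pipeline: a widths table from the lookups, a prefix scan (itertools.accumulate) for the start offsets, and a zip producing the OrderedDict in one constructor call.
import Mathlib
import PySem

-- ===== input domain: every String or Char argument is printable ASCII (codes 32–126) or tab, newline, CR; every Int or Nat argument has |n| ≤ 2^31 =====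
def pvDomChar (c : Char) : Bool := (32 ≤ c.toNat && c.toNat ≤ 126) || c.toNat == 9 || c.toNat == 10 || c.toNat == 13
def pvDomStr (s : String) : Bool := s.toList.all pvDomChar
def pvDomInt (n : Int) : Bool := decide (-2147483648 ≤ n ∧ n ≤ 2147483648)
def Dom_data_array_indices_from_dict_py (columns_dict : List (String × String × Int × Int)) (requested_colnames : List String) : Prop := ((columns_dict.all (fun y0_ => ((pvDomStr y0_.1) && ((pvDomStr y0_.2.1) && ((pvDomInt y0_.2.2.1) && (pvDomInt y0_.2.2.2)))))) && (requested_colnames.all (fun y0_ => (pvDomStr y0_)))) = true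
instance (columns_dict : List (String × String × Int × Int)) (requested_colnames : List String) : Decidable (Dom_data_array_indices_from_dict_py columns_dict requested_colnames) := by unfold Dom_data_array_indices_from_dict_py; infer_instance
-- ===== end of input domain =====

-- B replaces A's fused accumulator loop by a widths table, a prefix scan for the start
-- offsets, and a zip that builds the dict in one pass (objective: alternative decomposition).


-- ===== PORT A =====
-- columns_dict[colname] : first-match lookup in the association list (Python dicts have unique keys)
def pvLookupCol (columns_dict : List (String × String × Int × Int)) (c : String) :
    Option (String × Int × Int) :=
  (columns_dict.find? (fun p => p.1 == c)).map (·.2)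

-- literal port of A: one loop keeping (OrderedDict so far, icur); on KeyError (none) the
-- state is left unchanged (such inputs are excluded by Pre_)
def data_array_indices_from_dict_py (columns_dict : List (String × String × Int × Int)) (requested_colnames : List String) : List (String × Int × Int) :=
  (requested_colnames.foldl
    (fun (st : PySem.Dict String (Int × Int) × Int) colname =>
      match pvLookupCol columns_dict colname with
      | some (_, colname_ifirst, colname_ilast) =>
          (st.1.insert colname (st.2, st.2 + (colname_ilast - colname_ifirst)),
           st.2 + (colname_ilast - colname_ifirst) + 1)
      | none => st)
    (PySem.Dict.empty, 0)).1.items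

-- ===== PORT B =====
-- literal port of B: widths table, prefix scan (accumulate) for starts, zip into the dict
def data_array_indices_from_dict_py_alt (columns_dict : List (String × String × Int × Int)) (requested_colnames : List String) : List (String × Int × Int) :=
  let widths : List Int := requested_colnames.map (fun c =>
    match pvLookupCol columns_dict c with
    | some (_, i, j) => j - i
    | none => 0)
  let starts : List Int := (widths.map (· + 1)).scanl (· + ·) 0
  ((requested_colnames.zip (starts.zip widths)).foldl
    (fun (d : PySem.Dict String (Int × Int)) t => d.insert t.1 (t.2.1, t.2.1 + t.2.2))
    PySem.Dict.empty).items

-- ===== PRECONDITION & SPEC =====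
-- Pre_ excludes only requests naming a column absent from columns_dict, on which A raises KeyError.
def Pre_data_array_indices_from_dict_py (columns_dict : List (String × String × Int × Int)) (requested_colnames : List String) : Prop :=
  ∀ c ∈ requested_colnames, c ∈ columns_dict.map (·.1)
instance (columns_dict : List (String × String × Int × Int)) (requested_colnames : List String) : Decidable (Pre_data_array_indices_from_dict_py columns_dict requested_colnames) := by unfold Pre_data_array_indices_from_dict_py; infer_instance

def pvWitness_data_array_indices_from_dict_py : (List (String × String × Int × Int)) × List String :=
  ([("halo_id", "i8", 0, 17), ("mvir", "f4", 18, 29)], ["mvir", "halo_id"])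

def Spec_data_array_indices_from_dict_py (columns_dict : List (String × String × Int × Int)) (requested_colnames : List String) (out : List (String × Int × Int)) : Prop := out = data_array_indices_from_dict_py_alt columns_dict requested_colnames
instance (columns_dict : List (String × String × Int × Int)) (requested_colnames : List String) (out : List (String × Int × Int)) : Decidable (Spec_data_array_indices_from_dict_py columns_dict requested_colnames out) := by unfold Spec_data_array_indices_from_dict_py; infer_instance

-- ===== CLAIM (what is proved, stated in full; the proofs are below) =====
def Claim_equal_data_array_indices_from_dict_py : Prop := ∀ (columns_dict : List (String × String × Int × Int)) (requested_colnames : List String), Dom_data_array_indices_from_dict_py columns_dict requested_colnames → Pre_data_array_indices_from_dict_py columns_dict requested_colnames → Spec_data_array_indices_from_dict_py columns_dict requested_colnames (data_array_indices_from_dict_py columns_dict requested_colnames)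

-- ===== LEMMAS AND PROOFS =====

-- Pre_ makes every lookup succeed
lemma pvLookup_isSome (columns_dict : List (String × String × Int × Int)) (c : String)
    (h : c ∈ columns_dict.map (·.1)) : (pvLookupCol columns_dict c).isSome := by
  unfold pvLookupCol
  induction columns_dict with
  | nil => simp at h
  | cons p rest ih =>
    simp only [List.map_cons, List.mem_cons] at h
    by_cases hc : p.1 == c
    · simp [List.find?, hc]
    · rcases h with h | h
      · exact absurd (beq_iff_eq.mpr h.symm) hc
      · simpa [List.find?, hc] using ih h

-- main invariant: starting from any dict dd and offset icur, A's fused loop produces the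
-- same dict as B's zip-fold where the prefix scan starts at icur
lemma pv_main (columns_dict : List (String × String × Int × Int))
    (req : List String)
    (h : ∀ c ∈ req, c ∈ columns_dict.map (·.1))
    (dd : PySem.Dict String (Int × Int)) (icur : Int) :
    (req.foldl
      (fun (st : PySem.Dict String (Int × Int) × Int) colname =>
        match pvLookupCol columns_dict colname with
        | some (_, colname_ifirst, colname_ilast) =>
            (st.1.insert colname (st.2, st.2 + (colname_ilast - colname_ifirst)),
             st.2 + (colname_ilast - colname_ifirst) + 1)
        | none => st)
      (dd, icur)).1
    =
    (req.zip ((((req.map (fun c =>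
        match pvLookupCol columns_dict c with
        | some (_, i, j) => j - i
        | none => 0)).map (· + 1)).scanl (· + ·) icur).zip
        (req.map (fun c =>
        match pvLookupCol columns_dict c with
        | some (_, i, j) => j - i
        | none => 0)))).foldl
      (fun (d : PySem.Dict String (Int × Int)) t => d.insert t.1 (t.2.1, t.2.1 + t.2.2))
      dd := by
  induction req generalizing dd icur with
  | nil => rfl
  | cons c rest ih =>
    have hc := h c (List.mem_cons_self ..)
    have hrest : ∀ x ∈ rest, x ∈ columns_dict.map (·.1) :=
      fun x hx => h x (List.mem_cons_of_mem _ hx)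
    have hs := pvLookup_isSome columns_dict c hc
    obtain ⟨⟨dt, i, j⟩, hv⟩ := Option.isSome_iff_exists.mp hs
    simp only [List.map_cons, List.scanl_cons, List.zip_cons_cons, List.foldl_cons, hv]
    rw [show icur + (j - i + 1) = icur + (j - i) + 1 from (add_assoc icur (j - i) 1).symm]
    exact ih hrest (dd.insert c (icur, icur + (j - i))) (icur + (j - i) + 1)

-- ===== VERDICT (by name: the statement is the Claim_ definition above) =====
theorem data_array_indices_from_dict_py_spec : Claim_equal_data_array_indices_from_dict_py := by
  intro columns_dict requested_colnames _ hpre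
  unfold Spec_data_array_indices_from_dict_py
  unfold data_array_indices_from_dict_py data_array_indices_from_dict_py_alt
  have := pv_main columns_dict requested_colnames hpre PySem.Dict.empty 0
  simp only [this]
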